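-- pv_equiv track=rewrite | github.com/nirfer13/HorusBot | cogs/functions_twitch.py | _roles_to_remove
-- ===== SOURCE A (Python) =====
-- from typing import Dict, List, Optional
--
-- def _roles_to_remove(keep_role_id: int, tier_role_ids: List[int]) -> List[int]:
--     r = [rid for rid in tier_role_ids if rid]
--     if keep_role_id in r:
--         try:
--             r.remove(keep_role_id)
--         except ValueError:
--             pass
--     return r
-- ===== SOURCE B (Python) =====
-- from typing import List
--
-- def _roles_to_remove(keep_role_id: int, tier_role_ids: List[int]) -> List[int]:
--     result = []
--     removed = False
--     for rid in tier_role_ids: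
--         if not rid:
--             continue
--         if not removed and rid == keep_role_id:
--             removed = True
--             continue
--         result.append(rid)
--     return result
-- ===== Notes on version B (the rewrite author's own statement) =====
-- stated objective: simpler
-- what changed: Replaces the filter-comprehension plus membership test plus list.remove (which rescans the list) with a single pass that skips falsy ids and drops the first truthy occurrence of keep_role_id via a flag.
import Mathlib
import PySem

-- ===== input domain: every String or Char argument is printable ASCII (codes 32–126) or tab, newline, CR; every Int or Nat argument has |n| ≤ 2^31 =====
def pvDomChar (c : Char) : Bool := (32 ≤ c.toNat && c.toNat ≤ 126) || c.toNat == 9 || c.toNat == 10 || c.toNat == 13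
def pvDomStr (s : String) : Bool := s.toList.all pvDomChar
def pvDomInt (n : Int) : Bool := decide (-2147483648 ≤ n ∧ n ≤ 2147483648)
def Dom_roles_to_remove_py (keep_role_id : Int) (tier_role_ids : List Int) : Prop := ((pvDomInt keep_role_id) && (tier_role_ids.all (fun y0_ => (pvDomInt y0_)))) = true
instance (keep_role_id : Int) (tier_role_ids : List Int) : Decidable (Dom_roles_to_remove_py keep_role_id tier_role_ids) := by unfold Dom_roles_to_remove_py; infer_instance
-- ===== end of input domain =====

-- B fuses A's comprehension, membership test and list.remove into one pass with a removed-flag (simpler; return value only).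
-- ===== PORT A =====
def roles_to_remove_py (keep_role_id : Int) (tier_role_ids : List Int) : List Int :=
  let r := tier_role_ids.filter (fun rid => rid != 0)
  if keep_role_id ∈ r then
    match PySem.List.remove? r keep_role_id with
    | some r' => r'
    | none => r
  else r

-- ===== PORT B =====
def rolesAltGo (keep_role_id : Int) (removed : Bool) : List Int → List Int
  | [] => []
  | rid :: rest =>
    if rid == 0 then rolesAltGo keep_role_id removed rest
    else if !removed && rid == keep_role_id then rolesAltGo keep_role_id true rest
    else rid :: rolesAltGo keep_role_id removed rest

def roles_to_remove_py_alt (keep_role_id : Int) (tier_role_ids : List Int) : List Int :=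
  rolesAltGo keep_role_id false tier_role_ids

-- ===== PRECONDITION & SPEC =====
def Spec_roles_to_remove_py (keep_role_id : Int) (tier_role_ids : List Int) (out : List Int) : Prop := out = roles_to_remove_py_alt keep_role_id tier_role_ids
instance (keep_role_id : Int) (tier_role_ids : List Int) (out : List Int) : Decidable (Spec_roles_to_remove_py keep_role_id tier_role_ids out) := by unfold Spec_roles_to_remove_py; infer_instance

-- ===== CLAIM (what is proved, stated in full; the proofs are below) =====
def Claim_equal_roles_to_remove_py : Prop := ∀ (keep_role_id : Int) (tier_role_ids : List Int), Dom_roles_to_remove_py keep_role_id tier_role_ids → Spec_roles_to_remove_py keep_role_id tier_role_ids (roles_to_remove_py keep_role_id tier_role_ids)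

-- ===== LEMMAS AND PROOFS =====

-- ===== VERDICT (by name: the statement is the Claim_ definition above) =====
theorem rolesAltGo_true (k : Int) (xs : List Int) :
    rolesAltGo k true xs = xs.filter (fun rid => rid != 0) := by
  induction xs with
  | nil => rfl
  | cons r rest ih =>
    by_cases h : r = 0 <;> simp [rolesAltGo, List.filter_cons, bne_iff_ne, h, ih]

theorem rolesAltGo_false (k : Int) (xs : List Int) :
    rolesAltGo k false xs = (xs.filter (fun rid => rid != 0)).erase k := by
  induction xs with
  | nil => rfl
  | cons r rest ih =>
    by_cases h0 : r = 0
    · simp [rolesAltGo, List.filter_cons, bne_iff_ne, h0, ih]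
    · by_cases hk : r = k
      · subst hk
        simp [rolesAltGo, List.filter_cons, bne_iff_ne, h0, rolesAltGo_true, List.erase_cons]
      · simp [rolesAltGo, List.filter_cons, bne_iff_ne, h0, hk, ih, List.erase_cons]

theorem roles_to_remove_py_spec : Claim_equal_roles_to_remove_py := by
  intro k ts _
  unfold Spec_roles_to_remove_py roles_to_remove_py roles_to_remove_py_alt
  rw [rolesAltGo_false]
  by_cases hm : k ∈ ts.filter (fun rid => rid != 0)
  · simp [hm, PySem.List.remove?_eq_some_erase _ _ hm]
  · simp [hm, List.erase_of_not_mem hm]
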